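-- pv_equiv track=rewrite | github.com/FahrenheitResearch/hrrr-maps | smart_hrrr/orchestrator.py | _apply_source_preference
-- ===== SOURCE A (Python) =====
-- from typing import List, Dict, Optional
--
-- def _detect_source(url: str) -> str:
--     """Classify URL source for logging and source-priority ordering."""
--     u = (url or "").lower()
--     if "nomads.ncep.noaa.gov" in u:
--         return "nomads"
--     if "ftpprd.ncep.noaa.gov" in u:
--         return "ftpprd"
--     if "s3.amazonaws.com" in u or "noaa-" in u:
--         return "aws"
--     if "pando" in u:
--         return "pando"
--     return "other"
--
-- def _apply_source_preference(urls: List[str], source_preference: Optional[List[str]] = None) -> List[str]: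
--     """Reorder URLs based on preferred source list.
--
--     source_preference examples:
--       ['aws', 'pando', 'nomads']
--       ['ftpprd', 'nomads']
--     """
--     if not source_preference:
--         return urls
--     order = {src.lower(): idx for idx, src in enumerate(source_preference)}
--     ranked = []
--     for original_idx, url in enumerate(urls):
--         src = _detect_source(url)
--         rank = order.get(src, len(order))
--         ranked.append((rank, original_idx, url))
--     ranked.sort(key=lambda t: (t[0], t[1]))
--     return [url for _, _, url in ranked]
-- ===== SOURCE B (Python) =====
-- from typing import List, Optional
--
-- def _detect_source(url: str) -> str:
--     """Classify URL source for logging and source-priority ordering."""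
--     u = (url or "").lower()
--     if "nomads.ncep.noaa.gov" in u:
--         return "nomads"
--     if "ftpprd.ncep.noaa.gov" in u:
--         return "ftpprd"
--     if "s3.amazonaws.com" in u or "noaa-" in u:
--         return "aws"
--     if "pando" in u:
--         return "pando"
--     return "other"
--
-- def _apply_source_preference(urls: List[str], source_preference: Optional[List[str]] = None) -> List[str]:
--     """Reorder URLs by preferred source: single-pass bucket distribution (no sort)."""
--     if not source_preference:
--         return urls
--     order = {src.lower(): idx for idx, src in enumerate(source_preference)}
--     default = len(order)
--     # every rank is an enumerate index (< len(source_preference)) or len(order) <= len(source_preference)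
--     buckets = [[] for _ in range(len(source_preference) + 1)]
--     for url in urls:
--         buckets[order.get(_detect_source(url), default)].append(url)
--     return [url for bucket in buckets for url in bucket]
-- ===== Notes on version B (the rewrite author's own statement) =====
-- stated objective: alternative
-- what changed: Replaces building (rank, idx, url) triples and stably sorting them with a single-pass bucket distribution: each URL is appended to the bucket of its rank and the buckets are concatenated in rank order, which reproduces the stable sort's original-index tiebreak.
import Mathlib
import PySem

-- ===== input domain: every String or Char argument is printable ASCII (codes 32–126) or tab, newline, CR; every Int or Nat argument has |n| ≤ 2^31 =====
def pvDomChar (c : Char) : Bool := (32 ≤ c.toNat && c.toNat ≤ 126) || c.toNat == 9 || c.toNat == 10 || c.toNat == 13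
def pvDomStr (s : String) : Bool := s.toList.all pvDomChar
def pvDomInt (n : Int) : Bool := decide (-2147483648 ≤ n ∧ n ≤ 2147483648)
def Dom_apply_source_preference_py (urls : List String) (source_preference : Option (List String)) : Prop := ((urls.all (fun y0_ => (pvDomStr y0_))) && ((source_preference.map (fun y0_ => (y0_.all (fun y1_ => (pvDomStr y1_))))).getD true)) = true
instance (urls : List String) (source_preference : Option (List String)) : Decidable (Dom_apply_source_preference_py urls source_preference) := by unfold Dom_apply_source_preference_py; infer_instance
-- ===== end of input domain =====

-- B replaces A's build-triples-then-stable-sort with a single-pass bucket distribution by rank (objective: alternative).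

-- ===== PORT A =====
-- shared helper: _detect_source (identical in Source A and Source B); '(url or "")' equals url for a str, so it is just url
def detectSource (url : String) : String :=
  let u := PySem.Str.lower url
  if PySem.Str.isIn "nomads.ncep.noaa.gov" u then "nomads"
  else if PySem.Str.isIn "ftpprd.ncep.noaa.gov" u then "ftpprd"
  else if PySem.Str.isIn "s3.amazonaws.com" u || PySem.Str.isIn "noaa-" u then "aws"
  else if PySem.Str.isIn "pando" u then "pando"
  else "other"

-- shared helper: the dict comprehension 'order = {src.lower(): idx for idx, src in enumerate(source_preference)}' (identical in Source A and Source B)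
def buildOrder (sp : List String) : PySem.Dict String Int :=
  (PySem.List.enumerate sp 0).foldl (fun d p => d.insert (PySem.Str.lower p.2) p.1) PySem.Dict.empty

def apply_source_preference_py (urls : List String) (source_preference : Option (List String)) : List String :=
  match source_preference with
  | none => urls                -- 'if not source_preference: return urls'
  | some [] => urls
  | some (s0 :: rest) =>
    let order := buildOrder (s0 :: rest)
    -- for original_idx, url in enumerate(urls): ranked.append((order.get(src, len(order)), original_idx, url))
    let ranked : List (Int × Int × String) :=
      (PySem.List.enumerate urls 0).foldl
        (fun acc p => acc ++ [(order.getD (detectSource p.2) (order.size : Int), p.1, p.2)]) []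
    -- ranked.sort(key=lambda t: (t[0], t[1])); return [url for _, _, url in ranked]
    (PySem.List.sorted2 ranked (fun t => t.1) (fun t => t.2.1)).map (fun t => t.2.2)

-- ===== PORT B =====
def apply_source_preference_py_alt (urls : List String) (source_preference : Option (List String)) : List String :=
  match source_preference with
  | none => urls                -- 'if not source_preference: return urls'
  | some [] => urls
  | some (s0 :: rest) =>
    let order := buildOrder (s0 :: rest)
    let dflt : Int := (order.size : Int)
    -- buckets = [[] for _ in range(len(source_preference) + 1)]
    let buckets : List (List String) := List.replicate ((s0 :: rest).length + 1) []
    -- for url in urls: buckets[order.get(_detect_source(url), default)].append(url)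
    -- the bucket index is a dict value (an enumerate index ≥ 0) or len(order) ≥ 0, so .toNat is exact
    ((urls.foldl
        (fun bs url => bs.modify (order.getD (detectSource url) dflt).toNat (· ++ [url]))
        buckets)).flatten

-- ===== PRECONDITION & SPEC =====
def Spec_apply_source_preference_py (urls : List String) (source_preference : Option (List String)) (out : List String) : Prop := out = apply_source_preference_py_alt urls source_preference
instance (urls : List String) (source_preference : Option (List String)) (out : List String) : Decidable (Spec_apply_source_preference_py urls source_preference out) := by unfold Spec_apply_source_preference_py; infer_instance

-- ===== CLAIM (what is proved, stated in full; the proofs are below) =====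
def Claim_equal_apply_source_preference_py : Prop := ∀ (urls : List String) (source_preference : Option (List String)), Dom_apply_source_preference_py urls source_preference → Spec_apply_source_preference_py urls source_preference (apply_source_preference_py urls source_preference)

-- ===== LEMMAS AND PROOFS =====

-- every lookup in a dict built by a fold of inserts is the default, the start dict's value, or one of the inserted values
theorem getD_foldl_insert_cases (l : List (Int × String)) (d : PySem.Dict String Int) (k : String) (d0 : Int) :
    ((l.foldl (fun d p => d.insert (PySem.Str.lower p.2) p.1) d).getD k d0 = d.getD k d0) ∨
    (∃ p ∈ l, (l.foldl (fun d p => d.insert (PySem.Str.lower p.2) p.1) d).getD k d0 = p.1) := by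
  induction l generalizing d with
  | nil => exact Or.inl rfl
  | cons p t ih =>
    simp only [List.foldl_cons]
    rcases ih (d.insert (PySem.Str.lower p.2) p.1) with h | ⟨q, hq, hval⟩
    · rw [h, PySem.Dict.getD_insert]
      split_ifs with hk
      · exact Or.inr ⟨p, List.mem_cons_self, rfl⟩
      · exact Or.inl rfl
    · exact Or.inr ⟨q, List.mem_cons_of_mem _ hq, hval⟩

theorem size_foldl_insert_le (l : List (Int × String)) (d : PySem.Dict String Int) :
    (l.foldl (fun d p => d.insert (PySem.Str.lower p.2) p.1) d).size ≤ d.size + l.length := by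
  induction l generalizing d with
  | nil => simp
  | cons p t ih =>
    simp only [List.foldl_cons, List.length_cons]
    have h1 := ih (d.insert (PySem.Str.lower p.2) p.1)
    have h2 : (d.insert (PySem.Str.lower p.2) p.1).size ≤ d.size + 1 := by
      rw [PySem.Dict.size_insert]; split_ifs <;> omega
    omega

-- the rank of any url lies in [0, sp.length]
theorem rank_bounds (sp : List String) (u : String) :
    0 ≤ (buildOrder sp).getD (detectSource u) ((buildOrder sp).size : Int) ∧
    (buildOrder sp).getD (detectSource u) ((buildOrder sp).size : Int) ≤ (sp.length : Int) := by
  have hsize : (buildOrder sp).size ≤ sp.length := by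
    have := size_foldl_insert_le (PySem.List.enumerate sp 0) PySem.Dict.empty
    simpa [buildOrder, PySem.List.length_enumerate] using this
  generalize hd : ((buildOrder sp).size : Int) = d0
  have hd0 : 0 ≤ d0 ∧ d0 ≤ (sp.length : Int) := by omega
  unfold buildOrder
  rcases getD_foldl_insert_cases (PySem.List.enumerate sp 0) PySem.Dict.empty (detectSource u) d0 with h | ⟨p, hp, hval⟩
  · rw [h, PySem.Dict.getD_empty]
    exact hd0
  · rw [hval]
    rw [PySem.List.mem_enumerate_iff] at hp
    obtain ⟨j, hj, rfl⟩ := hp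
    constructor <;> simp <;> omega

-- insertBy only consults 'before' on its argument and the accumulator's elements
theorem insertBy_congr {α : Type} (S : α → Prop) (b1 b2 : α → α → Bool)
    (h : ∀ a b, S a → S b → b1 a b = b2 a b) (x : α) (acc : List α)
    (hx : S x) (hacc : ∀ a ∈ acc, S a) :
    PySem.List.insertBy b1 x acc = PySem.List.insertBy b2 x acc := by
  induction acc with
  | nil => rfl
  | cons y ys ih =>
    have hy : S y := hacc y List.mem_cons_self
    have hys : ∀ a ∈ ys, S a := fun a ha => hacc a (List.mem_cons_of_mem _ ha)
    simp only [PySem.List.insertBy, h x y hx hy, ih hys]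

theorem foldl_insertBy_congr {α : Type} (S : α → Prop) (b1 b2 : α → α → Bool)
    (h : ∀ a b, S a → S b → b1 a b = b2 a b) :
    ∀ (xs acc : List α), (∀ a ∈ xs, S a) → (∀ a ∈ acc, S a) →
    xs.foldl (fun acc x => PySem.List.insertBy b1 x acc) acc =
    xs.foldl (fun acc x => PySem.List.insertBy b2 x acc) acc := by
  intro xs
  induction xs with
  | nil => intro acc _ _; rfl
  | cons x t ih =>
    intro acc hxs hacc
    have hx : S x := hxs x List.mem_cons_self
    simp only [List.foldl_cons]
    rw [insertBy_congr S b1 b2 h x acc hx hacc]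
    apply ih _ (fun a ha => hxs a (List.mem_cons_of_mem _ ha))
    intro a ha
    rcases (PySem.List.mem_insertBy _ _ _ _).1 ha with rfl | ha'
    · exact hx
    · exact hacc a ha'

theorem keylt (ra ia rb ib N : Int) (h0 : 0 ≤ ia) (h1 : ia < N) (h2 : 0 ≤ ib) (hr : ra < rb) :
    ra * N + ia < rb * N + ib := by nlinarith

-- sum over range with a single possibly-nonzero index
theorem sum_map_range_eq_single (g : Nat → Nat) (n k : Nat) (hk : k < n)
    (h0 : ∀ j < n, j ≠ k → g j = 0) : ((List.range n).map g).sum = g k := by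
  induction n with
  | zero => omega
  | succ m ih =>
    rw [List.range_succ, List.map_append, List.sum_append]
    by_cases hkm : k = m
    · subst hkm
      have : ((List.range k).map g).sum = 0 := by
        apply List.sum_eq_zero
        intro x hx
        simp only [List.mem_map, List.mem_range] at hx
        obtain ⟨j, hj, rfl⟩ := hx
        exact h0 j (by omega) (by omega)
      simp [this]
    · have := ih (by omega) (fun j hj hne => h0 j (by omega) hne)
      rw [this]
      have : g m = 0 := h0 m (by omega) (by omega)
      simp [this]

theorem count_filter' {α : Type} [DecidableEq α] (a : α) (p : α → Bool) (l : List α) :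
    List.count a (l.filter p) = if p a then List.count a l else 0 := by
  split_ifs with hpa
  · exact List.count_filter hpa
  · apply List.count_eq_zero.2
    intro hmem
    exact absurd (List.of_mem_filter hmem) (by simp [hpa])

-- distributing a list into rank buckets and concatenating is a permutation of the list
theorem flatMap_filter_perm {α : Type} [DecidableEq α] (l : List α) (f : α → Int) (n : Nat)
    (h : ∀ x ∈ l, 0 ≤ f x ∧ f x < n) :
    ((List.range n).flatMap (fun (j : Nat) => l.filter (fun x => f x == (j : Int)))).Perm l := by
  rw [List.perm_iff_count]
  intro a
  rw [List.count_flatMap]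
  by_cases hal : a ∈ l
  · obtain ⟨ha0, han⟩ := h a hal
    have hkn : (f a).toNat < n := by omega
    rw [sum_map_range_eq_single _ n (f a).toNat hkn]
    · simp only [Function.comp]
      rw [count_filter']
      have : (f a == ((f a).toNat : Int)) = true := by simp; omega
      rw [this]
      simp
    · intro j hj hne
      simp only [Function.comp]
      rw [count_filter']
      have : (f a == (j : Int)) = false := by simp; omega
      rw [this]
      simp
  · have hz : ∀ j : Nat, List.count a (l.filter (fun x => f x == (j : Int))) = 0 := by
      intro j
      apply List.count_eq_zero.2
      intro hmem
      exact hal (List.mem_of_mem_filter hmem)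
    rw [List.count_eq_zero.2 hal]
    apply List.sum_eq_zero
    intro x hx
    simp only [List.mem_map, List.mem_range, Function.comp] at hx
    obtain ⟨j, _, rfl⟩ := hx
    exact hz j

-- filtering an enumerate on the element and projecting back is filtering the list
theorem enum_filter_snd (q : String → Bool) :
    ∀ (l : List String) (s : Int),
    ((PySem.List.enumerate l s).filter (fun p => q p.2)).map (fun p => p.2) = l.filter q := by
  intro l
  induction l with
  | nil => intro s; rfl
  | cons x t ih =>
    intro s
    simp only [PySem.List.enumerate, List.filter_cons]
    by_cases hq : q x
    · simp [hq, ih (s + 1)]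
    · simp [hq, ih (s + 1)]

-- the bucket fold, elementwise: bucket j ends as its start value plus the urls of rank j, in input order
theorem foldl_modify_getElem? (rkN : String → Nat) :
    ∀ (urls : List String) (init : List (List String)) (j : Nat),
    (urls.foldl (fun bs u => bs.modify (rkN u) (· ++ [u])) init)[j]? =
      init[j]?.map (fun b => b ++ urls.filter (fun u => rkN u == j)) := by
  intro urls
  induction urls with
  | nil =>
    intro init j
    simp [Option.map_id']
  | cons u t ih =>
    intro init j
    simp only [List.foldl_cons]
    rw [ih, List.getElem?_modify]
    by_cases hj : rkN u = j
    · subst hj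
      simp only [List.filter_cons, beq_self_eq_true]
      cases init[rkN u]? <;> simp
    · have hbeq : (rkN u == j) = false := by simp [hj]
      simp only [List.filter_cons, hbeq, if_neg hj]
      cases init[j]? <;> simp

-- the whole bucket pass, flattened, is the rank-indexed concatenation of filters
theorem B_eq_flatMap (rkN : String → Nat) (urls : List String) (n : Nat) :
    ((urls.foldl (fun bs u => bs.modify (rkN u) (· ++ [u])) (List.replicate n ([] : List String)))).flatten =
    (List.range n).flatMap (fun j => urls.filter (fun u => rkN u == j)) := by
  have h : (urls.foldl (fun bs u => bs.modify (rkN u) (· ++ [u])) (List.replicate n ([] : List String))) =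
      (List.range n).map (fun j => urls.filter (fun u => rkN u == j)) := by
    apply List.ext_getElem?
    intro i
    rw [foldl_modify_getElem?, List.getElem?_map, List.getElem?_replicate]
    by_cases hi : i < n
    · rw [List.getElem?_range hi]
      simp [hi]
    · rw [if_neg hi]
      have : (List.range n)[i]? = none := by
        rw [List.getElem?_eq_none_iff]
        simpa using hi
      rw [this]
      rfl
  rw [h, List.flatMap_def]

-- A's stable sort on (rank, idx, url) triples, as the rank-indexed concatenation of filters
theorem sorted2_ranked (urls : List String) (rk : String → Int) (n : Nat)
    (hb : ∀ u, 0 ≤ rk u ∧ rk u < (n : Int)) :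
    (PySem.List.sorted2 ((PySem.List.enumerate urls 0).map (fun p => (rk p.2, p.1, p.2)))
       (fun t => t.1) (fun t => t.2.1)).map (fun t => t.2.2) =
    (List.range n).flatMap (fun (j : Nat) => urls.filter (fun u => rk u == (j : Int))) := by
  have hN : ∀ p ∈ PySem.List.enumerate urls 0, 0 ≤ p.1 ∧ p.1 < (urls.length : Int) := by
    intro p hp
    rw [PySem.List.mem_enumerate_iff] at hp
    obtain ⟨k, hk, rfl⟩ := hp
    constructor <;> simp <;> omega
  set N : Int := (urls.length : Int) with hNdef
  set g : (Int × String) → (Int × Int × String) := fun p => (rk p.2, p.1, p.2) with hg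
  set ranked := (PySem.List.enumerate urls 0).map g with hranked
  have hmem : ∀ t ∈ ranked, (0 ≤ t.2.1 ∧ t.2.1 < N) ∧ (0 ≤ t.1 ∧ t.1 < (n : Int)) := by
    intro t ht
    rw [hranked, List.mem_map] at ht
    obtain ⟨p, hp, rfl⟩ := ht
    exact ⟨hN p hp, hb p.2⟩
  set K : (Int × Int × String) → Int := fun t => t.1 * N + t.2.1 with hK
  -- step 1: sorted2 is the insertBy fold with the lexicographic 'before'
  have step1 : PySem.List.sorted2 ranked (fun t => t.1) (fun t => t.2.1) =
      ranked.foldl (fun acc x => PySem.List.insertBy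
        (fun a b => decide (a.1 < b.1) || (!decide (b.1 < a.1) && decide (a.2.1 < b.2.1))) x acc) [] := rfl
  -- step 2: on ranked's elements that 'before' coincides with the strict order of the combined key K
  have hagree : ∀ a b : Int × Int × String, a ∈ ranked → b ∈ ranked →
      (decide (a.1 < b.1) || (!decide (b.1 < a.1) && decide (a.2.1 < b.2.1))) = decide (K a < K b) := by
    intro a b ha hb'
    obtain ⟨⟨ha0, haN⟩, _⟩ := hmem a ha
    obtain ⟨⟨hb0, hbN⟩, _⟩ := hmem b hb'
    rcases lt_trichotomy a.1 b.1 with h | h | h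
    · have hKlt : K a < K b := keylt a.1 a.2.1 b.1 b.2.1 N ha0 haN hb0 h
      simp [h, hKlt]
    · have : (K a < K b) ↔ (a.2.1 < b.2.1) := by
        rw [hK]; dsimp only; rw [h]; omega
      simp [h, this]
    · have hKgt : K b < K a := keylt b.1 b.2.1 a.1 a.2.1 N hb0 hbN ha0 h
      have h1 : ¬ a.1 < b.1 := by omega
      have h2 : ¬ K a < K b := by omega
      simp [h1, h, h2]
  have step2 : ranked.foldl (fun acc x => PySem.List.insertBy
        (fun a b => decide (a.1 < b.1) || (!decide (b.1 < a.1) && decide (a.2.1 < b.2.1))) x acc) [] =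
      ranked.foldl (fun acc x => PySem.List.insertBy (fun a b => decide (K a < K b)) x acc) [] := by
    apply foldl_insertBy_congr (fun t => t ∈ ranked) _ _ hagree ranked [] (fun a ha => ha)
    intro a ha
    simp at ha
  -- step 3: that fold is PySem's sorted with key K, which equals the bucket concatenation
  set ys := (List.range n).flatMap (fun (j : Nat) => ranked.filter (fun t => t.1 == (j : Int))) with hys
  have hperm : ys.Perm ranked := by
    exact flatMap_filter_perm ranked (fun t => t.1) n (fun t ht => (hmem t ht).2)
  have hpair : List.Pairwise (fun a b => K a < K b) ys := by
    rw [hys, List.flatMap_def, List.pairwise_flatten]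
    constructor
    · intro l' hl'
      rw [List.mem_map] at hl'
      obtain ⟨j, _, rfl⟩ := hl'
      have hpr : List.Pairwise (fun a b : Int × Int × String => a.2.1 < b.2.1) ranked := by
        rw [hranked, List.pairwise_map]
        exact (PySem.List.pairwise_lt_enumerate urls 0).imp (fun h => h)
      refine (hpr.filter _).imp_of_mem ?_
      intro a b ha hb hab
      have haj : a.1 = (j : Int) := by simpa using List.of_mem_filter ha
      have hbj : b.1 = (j : Int) := by simpa using List.of_mem_filter hb
      rw [hK]; dsimp only; rw [haj, hbj]; omega
    · rw [List.pairwise_map]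
      refine List.pairwise_lt_range.imp_of_mem ?_
      intro j j' _ _ hjj' a ha b hb
      have haj : a.1 = (j : Int) := by simpa using List.of_mem_filter ha
      have hbj : b.1 = (j' : Int) := by simpa using List.of_mem_filter hb
      have haR : a ∈ ranked := List.mem_of_mem_filter ha
      have hbR : b ∈ ranked := List.mem_of_mem_filter hb
      obtain ⟨⟨ha0, haN⟩, _⟩ := hmem a haR
      obtain ⟨⟨hb0, hbN⟩, _⟩ := hmem b hbR
      exact keylt a.1 a.2.1 b.1 b.2.1 N ha0 haN hb0 (by omega)
  have step3 : PySem.List.sorted ranked K = ys :=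
    PySem.List.sorted_eq_of_perm_of_pairwise_lt ranked ys K hperm hpair
  rw [step1, step2, ← PySem.List.sorted_eq_foldl_insertBy ranked K, step3]
  -- step 4: project out the urls
  rw [hys, List.map_flatMap]
  congr 1
  funext j
  rw [hranked, List.filter_map, List.map_map]
  exact enum_filter_snd (fun u => rk u == (j : Int)) urls 0

-- main equivalence on the non-empty-preference branch
theorem main_branch (urls : List String) (s0 : String) (rest : List String) :
    apply_source_preference_py urls (some (s0 :: rest)) =
    apply_source_preference_py_alt urls (some (s0 :: rest)) := by
  set rk : String → Int :=
    fun u => (buildOrder (s0 :: rest)).getD (detectSource u) (((buildOrder (s0 :: rest)).size : Int)) with hrk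
  set n : Nat := (s0 :: rest).length + 1 with hn
  have hb : ∀ u, 0 ≤ rk u ∧ rk u < (n : Int) := by
    intro u
    obtain ⟨h1, h2⟩ := rank_bounds (s0 :: rest) u
    refine ⟨h1, ?_⟩
    have h2' : rk u ≤ ((s0 :: rest).length : Int) := h2
    rw [hn]
    push_cast
    omega
  have hA : apply_source_preference_py urls (some (s0 :: rest)) =
      (PySem.List.sorted2
        ((PySem.List.enumerate urls 0).foldl (fun acc p => acc ++ [(rk p.2, p.1, p.2)]) [])
        (fun t => t.1) (fun t => t.2.1)).map (fun t => t.2.2) := rfl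
  have hfold : (PySem.List.enumerate urls 0).foldl (fun acc p => acc ++ [(rk p.2, p.1, p.2)]) [] =
      (PySem.List.enumerate urls 0).map (fun p => (rk p.2, p.1, p.2)) := by
    simpa using PySem.List.foldl_append_singleton_eq_map (fun p => (rk p.2, p.1, p.2)) (PySem.List.enumerate urls 0) []
  rw [hfold] at hA
  have hB : apply_source_preference_py_alt urls (some (s0 :: rest)) =
      ((urls.foldl (fun bs u => bs.modify (rk u).toNat (· ++ [u]))
        (List.replicate n ([] : List String)))).flatten := rfl
  rw [B_eq_flatMap] at hB
  rw [hA, hB, sorted2_ranked urls rk n hb]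
  congr 1
  funext j
  apply List.filter_congr
  intro u _
  have h0 := (hb u).1
  rcases Int.eq_ofNat_of_zero_le h0 with ⟨k, hk⟩
  rw [hk, Int.toNat_natCast]
  by_cases hkj : k = j
  · subst hkj; simp
  · have h1 : (k == j) = false := by simp [hkj]
    have h2 : (((k : Int)) == ((j : Int))) = false := by simp; omega
    rw [h1, h2]

-- ===== VERDICT (by name: the statement is the Claim_ definition above) =====
theorem apply_source_preference_py_spec : Claim_equal_apply_source_preference_py := by
  intro urls sp _
  unfold Spec_apply_source_preference_py
  match sp with
  | none => rfl
  | some [] => rfl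
  | some (s0 :: rest) => exact main_branch urls s0 rest
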